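-- pv_equiv track=rewrite | github.com/tiskus333/TKOM_refactor | StaticAnalysis/analyzer.py | check_all_scopes
-- ===== SOURCE A (Python) =====
-- def check_all_scopes(scope, name, list):
--     scope = scope.split('.')
--     for i in range(0, len(scope)):
--         if i == 0:
--             scope_ = '.'.join(scope)
--         else:
--             scope_ = '.'.join(scope[:-i])
--         if (scope_, name) in list:
--             return list.get((scope_, name))
--     return None
-- ===== SOURCE B (Python) =====
-- def check_all_scopes(scope, name, list):
--     # Single pass over the dict items: an entry qualifies when its name matches
--     # and its scope key is the whole scope or a '.'-prefix of it; keep the value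
--     # of the qualifying entry with the longest scope key (the innermost scope).
--     best = None
--     best_len = -1
--     for (s, n), v in list.items():
--         if n == name and (s == scope or scope.startswith(s + '.')) and len(s) > best_len:
--             best = v
--             best_len = len(s)
--     return best
-- ===== Notes on version B (the rewrite author's own statement) =====
-- stated objective: alternative
-- what changed: Instead of splitting the scope and probing the dict with each progressively shorter rejoined prefix key, B makes a single pass over the dict's items and keeps the value of the entry whose name matches and whose scope key is the full scope or a '.'-prefix of it, with the longest such key winning (the innermost scope).
import Mathlib
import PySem

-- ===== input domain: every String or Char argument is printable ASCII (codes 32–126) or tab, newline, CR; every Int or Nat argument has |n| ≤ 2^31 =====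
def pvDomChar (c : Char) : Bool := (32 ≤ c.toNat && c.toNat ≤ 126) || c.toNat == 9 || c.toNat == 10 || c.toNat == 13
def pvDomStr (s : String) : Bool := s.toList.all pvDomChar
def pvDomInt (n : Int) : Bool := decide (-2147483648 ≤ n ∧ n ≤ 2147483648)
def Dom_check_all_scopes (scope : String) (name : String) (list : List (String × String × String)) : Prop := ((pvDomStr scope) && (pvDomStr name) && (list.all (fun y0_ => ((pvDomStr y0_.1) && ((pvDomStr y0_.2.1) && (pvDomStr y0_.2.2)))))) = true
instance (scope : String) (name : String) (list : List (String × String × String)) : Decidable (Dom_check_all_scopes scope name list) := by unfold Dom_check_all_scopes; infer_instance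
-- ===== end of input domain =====

-- B replaces A's generate-candidate-keys-and-probe-the-dict loop by ONE pass over the
-- dict's items, keeping the value of the qualifying entry (name matches, key is the
-- scope or a '.'-prefix of it) with the longest key; objective: alternative.
-- The dict argument is a (scope, name)-keyed association list; lookup is first match.

-- ===== PORT A =====
-- `(scope_, name) in list` / `list.get((scope_, name))` on the tuple-keyed dict
def pvDictContains (list : List (String × String × String)) (s n : String) : Bool :=
  list.any (fun t => t.1 == s && t.2.1 == n)
def pvDictGet (list : List (String × String × String)) (s n : String) : Option String :=
  (list.find? (fun t => t.1 == s && t.2.1 == n)).map (fun t => t.2.2)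

-- the `for i in range(0, len(scope))` loop with its early return
def check_all_scopes_loop (parts : List String) (name : String)
    (list : List (String × String × String)) : List Int → Option String
  | [] => none
  | i :: rest =>
      let scope_ := if i == 0 then PySem.Str.join "." parts
                    else PySem.Str.join "." (PySem.List.slice parts none (some (-i)))
      if pvDictContains list scope_ name then pvDictGet list scope_ name
      else check_all_scopes_loop parts name list rest

-- `scope = scope.split('.')` (sep "." is nonempty, so Python's split? is this splitOn)
def check_all_scopes_parts (scope : String) : List String :=
  (PySem.Chars.splitOn scope.toList ".".toList).map String.ofList

def check_all_scopes (scope : String) (name : String) (list : List (String × String × String)) : Option String :=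
  check_all_scopes_loop (check_all_scopes_parts scope) name list
    (PySem.List.pyRange 0 (check_all_scopes_parts scope).length)

-- ===== PORT B =====
-- one pass over list.items() keeping (best, best_len); `len(s)` is PySem.Str.len,
-- `scope.startswith(s + '.')` is PySem.Str.startswith
def check_all_scopes_alt (scope : String) (name : String) (list : List (String × String × String)) : Option String :=
  (list.foldl
    (fun (acc : Option String × Int) t =>
      if t.2.1 == name && (t.1 == scope || PySem.Str.startswith scope (t.1 ++ ".")) &&
         decide (acc.2 < PySem.Str.len t.1)
      then (some t.2.2, PySem.Str.len t.1) else acc)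
    ((none : Option String), (-1 : Int))).1

-- ===== PRECONDITION & SPEC =====
def Spec_check_all_scopes (scope : String) (name : String) (list : List (String × String × String)) (out : Option String) : Prop := out = check_all_scopes_alt scope name list
instance (scope : String) (name : String) (list : List (String × String × String)) (out : Option String) : Decidable (Spec_check_all_scopes scope name list out) := by unfold Spec_check_all_scopes; infer_instance

-- ===== CLAIM (what is proved, stated in full; the proofs are below) =====
def Claim_equal_check_all_scopes : Prop := ∀ (scope : String) (name : String) (list : List (String × String × String)), Dom_check_all_scopes scope name list → Spec_check_all_scopes scope name list (check_all_scopes scope name list)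

-- ===== LEMMAS AND PROOFS =====

-- reference split: Python's s.split(c) as a structural recursion
def pvConsHead (p : List Char) : List (List Char) → List (List Char)
  | [] => [p]
  | h :: t => (p ++ h) :: t

def pvSplit (c : Char) : List Char → List (List Char)
  | [] => [[]]
  | x :: xs => if x = c then [] :: pvSplit c xs else pvConsHead [x] (pvSplit c xs)

theorem pvSplit_ne_nil (c : Char) (l : List Char) : pvSplit c l ≠ [] := by
  cases l with
  | nil => simp [pvSplit]
  | cons x xs =>
      by_cases hx : x = c
      · simp [pvSplit, hx]
      · simp only [pvSplit, hx, if_false]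
        cases pvSplit c xs <;> simp [pvConsHead]

theorem pvConsHead_nil (m : List (List Char)) (hm : m ≠ []) : pvConsHead [] m = m := by
  cases m with
  | nil => exact absurd rfl hm
  | cons h t => simp [pvConsHead]

theorem pvConsHead_consHead (p q : List Char) (m : List (List Char)) :
    pvConsHead p (pvConsHead q m) = pvConsHead (p ++ q) m := by
  cases m <;> simp [pvConsHead]

theorem splitOn_go_eq (c : Char) : ∀ (fuel : Nat) (l cur : List Char) (acc : List (List Char)),
    l.length < fuel →
    PySem.Chars.splitOn.go [c] fuel l cur acc = acc.reverse ++ pvConsHead cur.reverse (pvSplit c l) := by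
  intro fuel
  induction fuel with
  | zero => intro l cur acc h; omega
  | succ f ih =>
      intro l cur acc h
      cases l with
      | nil =>
          rw [PySem.Chars.splitOn.go.eq_def]
          simp [pvSplit, pvConsHead]
      | cons x rest =>
          rw [PySem.Chars.splitOn.go.eq_def]
          have hlen : rest.length < f := by simpa [Nat.succ_lt_succ_iff] using h
          by_cases hx : c = x
          · have hsp : ([c].isPrefixOf (x :: rest)) = true := by
              simp [hx]
            simp only [hsp, if_pos]
            rw [ih (List.drop [c].length (x :: rest)) [] (cur.reverse :: acc) (by simpa using hlen)]
            simp only [List.length_cons, List.length_nil, List.drop_succ_cons, List.drop_zero,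
              List.reverse_cons, List.reverse_nil]
            rw [pvConsHead_nil _ (pvSplit_ne_nil c rest)]
            simp [pvSplit, hx.symm, pvConsHead, List.append_assoc]
          · have hsp : ([c].isPrefixOf (x :: rest)) = false := by
              simp [List.isPrefixOf_cons₂, hx]
            simp only [hsp, Bool.false_eq_true, if_false]
            rw [ih rest (x :: cur) acc hlen]
            have hx' : ¬ x = c := fun hh => hx hh.symm
            simp [pvSplit, hx', pvConsHead_consHead]

theorem splitOn_eq_pvSplit (c : Char) (l : List Char) :
    PySem.Chars.splitOn l [c] = pvSplit c l := by
  unfold PySem.Chars.splitOn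
  rw [splitOn_go_eq c (l.length + 1) l [] [] (by omega)]
  simpa using pvConsHead_nil _ (pvSplit_ne_nil c l)

-- common reference search: keys are '.'-joins of ever shorter prefixes of the parts,
-- driven from the REVERSED parts list
def pvSearch (name : String) (list : List (String × String × String)) : List (List Char) → Option String
  | [] => none
  | p :: rest =>
      let k := String.ofList (PySem.Chars.join ['.'] ((p :: rest).reverse))
      if pvDictContains list k name then pvDictGet list k name else pvSearch name list rest

-- A's range loop computes the reference search: parts are the Strings of m
theorem loop_eq_pvSearch (name : String) (list : List (String × String × String)) (m : List (List Char)) :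
    ∀ (k i : Nat), i + k = m.length →
    check_all_scopes_loop (m.map String.ofList) name list (PySem.List.pyRange (i : Int) (m.map String.ofList).length) =
      pvSearch name list (m.reverse.drop i) := by
  intro k
  induction k with
  | zero =>
      intro i hi
      have hi' : i = m.length := by omega
      have hnil : PySem.List.pyRange (i : Int) (m.map String.ofList).length = [] := by
        simp [PySem.List.pyRange, hi']
      rw [hnil]
      simp [check_all_scopes_loop, hi', pvSearch, List.drop_eq_nil_of_le]
  | succ k ih =>
      intro i hi
      have hilt : i < m.length := by omega
      have hcons : PySem.List.pyRange (i : Int) (m.map String.ofList).length =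
          (i : Int) :: PySem.List.pyRange ((i : Int) + 1) (m.map String.ofList).length := by
        exact PySem.List.pyRange_one_cons (by simp; exact_mod_cast hilt)
      rw [hcons]
      have hslice : (if (i : Int) == 0 then PySem.Str.join "." (m.map String.ofList)
            else PySem.Str.join "." (PySem.List.slice (m.map String.ofList) none (some (-(i : Int))))) =
          PySem.Str.join "." ((m.map String.ofList).take (m.length - i)) := by
        by_cases hi0 : i = 0
        · subst hi0
          simp [List.take_of_length_le]
        · have h0 : ((i : Int) == 0) = false := by
            simp; exact_mod_cast hi0
          rw [h0]
          simp only [Bool.false_eq_true, if_false]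
          rw [PySem.List.slice_to_neg_natCast _ i (Nat.pos_of_ne_zero hi0)]
          simp
      have hdrop : m.reverse.drop i = (m.take (m.length - i)).reverse := by rw [List.drop_reverse]
      rcases hd : m.reverse.drop i with _ | ⟨q, r⟩
      · exfalso
        have : m.reverse.length ≤ i := List.drop_eq_nil_iff.mp hd
        simp at this; omega
      · have hkey : PySem.Str.join "." ((m.map String.ofList).take (m.length - i)) =
            String.ofList (PySem.Chars.join ['.'] ((q :: r).reverse)) := by
          have h1 : (q :: r).reverse = m.take (m.length - i) := by
            rw [← hd, hdrop, List.reverse_reverse]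
          rw [h1, ← List.map_take]
          simp [PySem.Str.join, List.map_map, Function.comp_def]
        simp only [check_all_scopes_loop, hslice, hkey, pvSearch, List.reverse_cons]
        by_cases hhit : pvDictContains list (String.ofList (PySem.Chars.join ['.'] (r.reverse ++ [q]))) name = true
        · rw [if_pos hhit, if_pos hhit]
        · rw [if_neg hhit, if_neg hhit]
          have hnext : m.reverse.drop (i + 1) = r := by
            have h2 : m.reverse.drop (i + 1) = (m.reverse.drop i).tail := by
              rw [← List.drop_one, List.drop_drop]
            rw [h2, hd]
            rfl
          have hih := ih (i + 1) (by omega)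
          rw [hnext] at hih
          rw [← hih]
          norm_cast

-- probing a list of candidate keys (first hit wins), keys kept as char lists
def probeKeysC (name : String) (list : List (String × String × String)) : List (List Char) → Option String
  | [] => none
  | k :: K =>
      if pvDictContains list (String.ofList k) name then pvDictGet list (String.ofList k) name
      else probeKeysC name list K

def keysOfRevC : List (List Char) → List (List Char)
  | [] => []
  | p :: rest => PySem.Chars.join ['.'] ((p :: rest).reverse) :: keysOfRevC rest

theorem pvSearch_eq_probe (name : String) (list : List (String × String × String)) (m : List (List Char)) :
    pvSearch name list m = probeKeysC name list (keysOfRevC m) := by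
  induction m with
  | nil => rfl
  | cons p rest ih => simp only [pvSearch, keysOfRevC, probeKeysC, ih]

theorem keysOfRevC_append_singleton (q : List Char) : ∀ (l : List (List Char)),
    keysOfRevC (l ++ [q]) = (keysOfRevC l).map (fun k => q ++ '.' :: k) ++ [q] := by
  intro l
  induction l with
  | nil => simp [keysOfRevC, PySem.Chars.join_singleton]
  | cons p rest ih =>
      have hrev : ((p :: rest) ++ [q]).reverse = q :: (p :: rest).reverse := by simp
      rcases hd : (p :: rest).reverse with _ | ⟨a, as⟩
      · simp at hd
      · have hjoin : PySem.Chars.join ['.'] (((p :: rest) ++ [q]).reverse) =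
            q ++ '.' :: PySem.Chars.join ['.'] ((p :: rest).reverse) := by
          rw [hrev, hd, PySem.Chars.join_cons_cons]
          simp
        show PySem.Chars.join ['.'] (((p :: rest) ++ [q]).reverse) :: keysOfRevC (rest ++ [q]) = _
        rw [hjoin, ih]
        simp [keysOfRevC]

-- candidate keys of cs, shortest first, by structural recursion on cs
def pvKeysOf : List Char → List (List Char)
  | [] => [[]]
  | x :: xs => if x = '.' then [] :: (pvKeysOf xs).map (fun k => '.' :: k)
               else (pvKeysOf xs).map (fun k => x :: k)

theorem keysOfRevC_split (cs : List Char) :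
    keysOfRevC ((pvSplit '.' cs).reverse) = (pvKeysOf cs).reverse := by
  induction cs with
  | nil => simp [pvSplit, keysOfRevC, pvKeysOf, PySem.Chars.join_singleton]
  | cons x xs ih =>
      by_cases hx : x = '.'
      · rw [show pvSplit '.' (x :: xs) = [] :: pvSplit '.' xs by simp [pvSplit, hx]]
        rw [List.reverse_cons, keysOfRevC_append_singleton, ih]
        simp [pvKeysOf, hx, List.map_reverse]
      · rcases hs : pvSplit '.' xs with _ | ⟨h, t⟩
        · exact absurd hs (pvSplit_ne_nil '.' xs)
        · rw [show pvSplit '.' (x :: xs) = (x :: h) :: t by simp [pvSplit, hx, hs, pvConsHead]]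
          rw [List.reverse_cons, keysOfRevC_append_singleton]
          rw [hs] at ih
          rw [List.reverse_cons, keysOfRevC_append_singleton] at ih
          have ih' : (keysOfRevC t.reverse).map (fun k => h ++ '.' :: k) ++ [h] =
              (pvKeysOf xs).reverse := ih
          rw [show pvKeysOf (x :: xs) = (pvKeysOf xs).map (fun k => x :: k) by simp [pvKeysOf, hx]]
          rw [← List.map_reverse, ← ih']
          simp [List.map_map, Function.comp_def]

theorem mem_pvKeysOf (cs t : List Char) :
    t ∈ pvKeysOf cs ↔ (t = cs ∨ (t ++ ['.']) <+: cs) := by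
  induction cs generalizing t with
  | nil =>
      simp only [pvKeysOf, List.mem_singleton]
      constructor
      · rintro rfl; exact Or.inl rfl
      · rintro (rfl | hp)
        · rfl
        · exact absurd hp.length_le (by simp)
  | cons x xs ih =>
      cases t with
      | nil =>
          by_cases hx : x = '.'
          · simp [pvKeysOf, hx, List.cons_prefix_cons]
          · constructor
            · intro hm
              simp only [pvKeysOf, hx, if_neg, not_false_iff, List.mem_map] at hm
              obtain ⟨k, -, hk⟩ := hm
              exact absurd hk (by simp)
            · rintro (h | hp)
              · exact absurd h (by simp)
              · rw [List.nil_append] at hp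
                rw [List.cons_prefix_cons] at hp
                exact absurd hp.1.symm hx
      | cons y t' =>
          have hmain : y :: t' ∈ pvKeysOf (x :: xs) ↔ (y = x ∧ t' ∈ pvKeysOf xs) := by
            by_cases hx : x = '.'
            · simp only [pvKeysOf, hx, if_pos, List.mem_cons, List.mem_map]
              constructor
              · rintro (h | ⟨k, hk, he⟩)
                · exact absurd h (by simp)
                · obtain ⟨h1, h2⟩ := List.cons.injEq .. ▸ he
                  exact ⟨h1.symm, h2 ▸ hk⟩
              · rintro ⟨rfl, hm⟩
                exact Or.inr ⟨t', hm, rfl⟩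
            · simp only [pvKeysOf, hx, if_neg, not_false_iff, List.mem_map]
              constructor
              · rintro ⟨k, hk, he⟩
                obtain ⟨h1, h2⟩ := List.cons.injEq .. ▸ he
                exact ⟨h1.symm, h2 ▸ hk⟩
              · rintro ⟨rfl, hm⟩
                exact ⟨t', hm, rfl⟩
          rw [hmain, ih]
          constructor
          · rintro ⟨rfl, (rfl | hp)⟩
            · exact Or.inl rfl
            · exact Or.inr (by rw [List.cons_append, List.cons_prefix_cons]; exact ⟨rfl, hp⟩)
          · rintro (h | hp)
            · obtain ⟨h1, h2⟩ := List.cons.injEq .. ▸ h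
              exact ⟨h1, Or.inl h2⟩
            · rw [List.cons_append, List.cons_prefix_cons] at hp
              exact ⟨hp.1, Or.inr hp.2⟩

theorem pairwise_pvKeysOf (cs : List Char) :
    (pvKeysOf cs).Pairwise (fun a b => a.length < b.length) := by
  induction cs with
  | nil => simp [pvKeysOf]
  | cons x xs ih =>
      by_cases hx : x = '.'
      · simp only [pvKeysOf, hx, if_pos]
        refine List.Pairwise.cons ?_ ?_
        · intro b hb
          obtain ⟨k, -, rfl⟩ := List.mem_map.mp hb
          simp
        · exact List.pairwise_map.mpr (by simpa using ih)
      · simp only [pvKeysOf, hx, if_neg, not_false_iff]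
        exact List.pairwise_map.mpr (by simpa using ih)

-- ----- B's fold characterised against key probing -----

-- B's loop step, by name (the port's lambda is definitionally this)
def pvStep (scope name : String) (acc : Option String × Int) (t : String × String × String) :
    Option String × Int :=
  if t.2.1 == name && (t.1 == scope || PySem.Str.startswith scope (t.1 ++ ".")) &&
     decide (acc.2 < PySem.Str.len t.1)
  then (some t.2.2, PySem.Str.len t.1) else acc

-- B's qualification test on a key
def pvQual (scope name : String) (t : String × String × String) : Bool :=
  t.2.1 == name && (t.1 == scope || PySem.Str.startswith scope (t.1 ++ "."))

theorem pvStep_eq (scope name : String) (acc : Option String × Int) (t : String × String × String) :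
    pvStep scope name acc t =
      if pvQual scope name t && decide (acc.2 < PySem.Str.len t.1)
      then (some t.2.2, PySem.Str.len t.1) else acc := by
  simp [pvStep, pvQual, Bool.and_assoc]

theorem pvQual_iff (scope name : String) (t : String × String × String) :
    pvQual scope name t = true ↔
      (t.2.1 = name ∧ (t.1.toList = scope.toList ∨ (t.1.toList ++ ['.']) <+: scope.toList)) := by
  have hsw : (PySem.Str.startswith scope (t.1 ++ ".") = true) ↔ (t.1.toList ++ ['.']) <+: scope.toList := by
    rw [PySem.Str.startswith_eq, PySem.Chars.startswith_iff]
    have : (t.1 ++ ".").toList = t.1.toList ++ ['.'] := by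
      rw [String.toList_append]; rfl
    rw [this]
  have heqs : ((t.1 == scope) = true) ↔ t.1.toList = scope.toList := by
    rw [beq_iff_eq]
    exact ⟨congrArg _, fun h => by rw [← String.ofList_toList (s := t.1), h, String.ofList_toList]⟩
  simp only [pvQual, Bool.and_eq_true, Bool.or_eq_true, beq_iff_eq, hsw, heqs]

theorem fold_freeze (scope name : String) (acc : Option String × Int) :
    ∀ (list : List (String × String × String)),
    (∀ t ∈ list, pvQual scope name t = true → PySem.Str.len t.1 ≤ acc.2) →
    list.foldl (pvStep scope name) acc = acc := by
  intro list
  induction list with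
  | nil => intro _; rfl
  | cons e rest ih =>
      intro h
      have hstep : pvStep scope name acc e = acc := by
        rw [pvStep_eq]
        by_cases hq : pvQual scope name e = true
        · have hle := h e (by simp) hq
          have hlt : ¬ (acc.2 < PySem.Str.len e.1) := by omega
          have hcond : (pvQual scope name e && decide (acc.2 < PySem.Str.len e.1)) = false := by
            rw [hq, decide_eq_false hlt]; rfl
          rw [if_neg (fun hh => by rw [hcond] at hh; simp at hh)]
        · have hq' : pvQual scope name e = false := Bool.eq_false_iff.mpr hq
          rw [if_neg (by simp [hq'])]
      rw [List.foldl_cons, hstep]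
      exact ih (fun t ht => h t (by simp [ht]))

theorem fold_hit (scope name k : String) :
    ∀ (list : List (String × String × String)) (acc : Option String × Int),
    pvQual scope name (k, name, "") = true →
    acc.2 < PySem.Str.len k →
    pvDictContains list k name = true →
    (∀ t ∈ list, pvQual scope name t = true → PySem.Str.len t.1 ≤ PySem.Str.len k) →
    (∀ t ∈ list, pvQual scope name t = true → PySem.Str.len t.1 = PySem.Str.len k → t.1 = k) →
    (list.foldl (pvStep scope name) acc).1 = pvDictGet list k name := by
  intro list
  induction list with
  | nil => intro acc _ _ hc _ _; simp [pvDictContains] at hc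
  | cons e rest ih =>
      intro acc hQk hacc hc hmax huniq
      by_cases he : (e.1 == k && e.2.1 == name) = true
      · have he12 := he
        rw [Bool.and_eq_true] at he12
        obtain ⟨he1, he2⟩ := he12
        have he1' : e.1 = k := beq_iff_eq.mp he1
        have he2' : e.2.1 = name := beq_iff_eq.mp he2
        have hqe : pvQual scope name e = true := by
          rw [pvQual_iff] at hQk ⊢
          exact ⟨he2', by rw [he1']; exact hQk.2⟩
        have hlt : acc.2 < PySem.Str.len e.1 := by rw [he1']; exact hacc
        have hcond : (pvQual scope name e && decide (acc.2 < PySem.Str.len e.1)) = true := by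
          rw [hqe, decide_eq_true hlt]; rfl
        have hstep : pvStep scope name acc e = (some e.2.2, PySem.Str.len e.1) := by
          rw [pvStep_eq, if_pos hcond]
        rw [List.foldl_cons, hstep]
        rw [fold_freeze scope name _ rest
          (fun t ht hq => by
            show PySem.Str.len t.1 ≤ PySem.Str.len e.1
            rw [he1']; exact hmax t (by simp [ht]) hq)]
        simp [pvDictGet, he]
      · have he' : (e.1 == k && e.2.1 == name) = false := Bool.eq_false_iff.mpr he
        have hget : pvDictGet (e :: rest) k name = pvDictGet rest k name := by
          simp [pvDictGet, he']
        have hcont : pvDictContains rest k name = true := by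
          have h1 := hc
          simp only [pvDictContains, List.any_cons, Bool.or_eq_true] at h1
          rcases h1 with h1 | h1
          · exact absurd h1 he
          · exact h1
        have hacc' : (pvStep scope name acc e).2 < PySem.Str.len k := by
          rw [pvStep_eq]
          by_cases hcnd : (pvQual scope name e && decide (acc.2 < PySem.Str.len e.1)) = true
          · rw [if_pos hcnd]
            have hcnd2 := hcnd
            rw [Bool.and_eq_true] at hcnd2
            obtain ⟨hq, -⟩ := hcnd2
            have hle := hmax e (by simp) hq
            rcases lt_or_eq_of_le hle with hcase | hcase
            · exact hcase
            · exfalso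
              have hek : e.1 = k := huniq e (by simp) hq hcase
              have hen : e.2.1 = name := (pvQual_iff _ _ _ |>.mp hq).1
              exact he (by simp [hek, hen])
          · rw [if_neg hcnd]
            exact hacc
        rw [List.foldl_cons, hget]
        exact ih (pvStep scope name acc e) hQk hacc' hcont
          (fun t ht hq => hmax t (by simp [ht]) hq)
          (fun t ht hq hl => huniq t (by simp [ht]) hq hl)

theorem fold_bridge (scope name : String) (list : List (String × String × String)) :
    ∀ (K : List (List Char)),
    K.Pairwise (fun a b => b.length < a.length) →
    (∀ t ∈ list, t.2.1 = name → (pvQual scope name t = true ↔ t.1.toList ∈ K)) →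
    (list.foldl (pvStep scope name) ((none : Option String), (-1 : Int))).1 =
      probeKeysC name list K := by
  intro K
  induction K with
  | nil =>
      intro _ hq
      rw [fold_freeze scope name _ list (fun t ht hqt => by
        have h1 := (pvQual_iff _ _ _).mp hqt
        exact absurd ((hq t ht h1.1).mp hqt) (by simp))]
      rfl
  | cons k K' ih =>
      intro hdec hq
      have hklen : PySem.Str.len (String.ofList k) = (k.length : Int) := by
        rw [PySem.Str.len_eq, String.toList_ofList]
      by_cases hc : pvDictContains list (String.ofList k) name = true
      · -- the longest candidate key is present: B's max-length pick is exactly it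
        obtain ⟨e, he, hee⟩ := List.any_eq_true.mp hc
        have he12 := hee
        rw [Bool.and_eq_true] at he12
        obtain ⟨he1, he2⟩ := he12
        have he1' : e.1 = String.ofList k := beq_iff_eq.mp he1
        have he2' : e.2.1 = name := beq_iff_eq.mp he2
        have hqe : pvQual scope name e = true := by
          apply (hq e he he2').mpr
          rw [he1', String.toList_ofList]
          simp
        have hmax : ∀ t ∈ list, pvQual scope name t = true →
            PySem.Str.len t.1 ≤ PySem.Str.len (String.ofList k) := by
          intro t ht hqt
          have hn : t.2.1 = name := (pvQual_iff _ _ _ |>.mp hqt).1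
          have hmem := (hq t ht hn).mp hqt
          rw [hklen, PySem.Str.len_eq]
          rcases List.mem_cons.mp hmem with h | h
          · rw [h]
          · have := (List.pairwise_cons.mp hdec).1 _ h
            omega
        have huniq : ∀ t ∈ list, pvQual scope name t = true →
            PySem.Str.len t.1 = PySem.Str.len (String.ofList k) → t.1 = String.ofList k := by
          intro t ht hqt hl
          have hn : t.2.1 = name := (pvQual_iff _ _ _ |>.mp hqt).1
          have hmem := (hq t ht hn).mp hqt
          rcases List.mem_cons.mp hmem with h | h
          · rw [← String.ofList_toList (s := t.1), h]
          · exfalso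
            have := (List.pairwise_cons.mp hdec).1 _ h
            rw [hklen, PySem.Str.len_eq] at hl
            omega
        have hQk : pvQual scope name (String.ofList k, name, "") = true := by
          rw [pvQual_iff] at hqe ⊢
          exact ⟨rfl, by rw [← he1']; exact hqe.2⟩
        rw [probeKeysC, if_pos hc]
        exact fold_hit scope name (String.ofList k) list _ hQk (by rw [hklen]; omega) hc hmax huniq
      · -- head key absent from the dict: drop it and recurse
        rw [probeKeysC, if_neg hc]
        apply ih (List.pairwise_cons.mp hdec).2
        intro t ht hn
        rw [hq t ht hn]
        constructor
        · intro hm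
          rcases List.mem_cons.mp hm with h | h
          · exfalso
            apply hc
            apply List.any_eq_true.mpr
            refine ⟨t, ht, ?_⟩
            have : t.1 = String.ofList k := by rw [← String.ofList_toList (s := t.1), h]
            simp [this, hn]
          · exact h
        · intro hm
          exact List.mem_cons.mpr (Or.inr hm)

-- ===== VERDICT (by name: the statement is the Claim_ definition above) =====
theorem check_all_scopes_spec : Claim_equal_check_all_scopes := by
  intro scope name list _
  unfold Spec_check_all_scopes
  -- A's side: the range loop is the probe of the candidate keys, longest first
  have hA : check_all_scopes scope name list =
      probeKeysC name list ((pvKeysOf scope.toList).reverse) := by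
    unfold check_all_scopes check_all_scopes_parts
    rw [show (".".toList) = ['.'] from rfl, splitOn_eq_pvSplit]
    have h1 := loop_eq_pvSearch name list (pvSplit '.' scope.toList)
      (pvSplit '.' scope.toList).length 0 (by omega)
    simp only [Nat.cast_zero, List.drop_zero] at h1
    rw [h1, pvSearch_eq_probe, keysOfRevC_split]
  -- B's side: the single max-length pass is the same probe
  have hB : check_all_scopes_alt scope name list =
      probeKeysC name list ((pvKeysOf scope.toList).reverse) := by
    have hfold : check_all_scopes_alt scope name list =
        (list.foldl (pvStep scope name) ((none : Option String), (-1 : Int))).1 := rfl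
    rw [hfold]
    apply fold_bridge
    · rw [List.pairwise_reverse]
      exact pairwise_pvKeysOf scope.toList
    · intro t ht hn
      rw [pvQual_iff, List.mem_reverse, mem_pvKeysOf]
      exact ⟨fun h => h.2, fun h => ⟨hn, h⟩⟩
  rw [hA, hB]
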